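-- pv_equiv track=rewrite | github.com/piruty/atcoder | atcoder_beginner_contest/abc_027B.py | execute
-- ===== SOURCE A (Python) =====
-- def execute(n, an):
--     if sum(an) % n:
--         return -1
--     t = sum(an) // n
--     b = 0
--     for i in range(1, n):
--         b += not (sum(an[:i]) == t * i and sum(an[i:]) == t * (n - i))
--     return b
-- ===== SOURCE B (Python) =====
-- def execute(n, an):
--     total = sum(an)
--     if total % n:
--         return -1
--     t = total // n
--     s = 0
--     bad = 0
--     for i in range(1, n):
--         s += an[i - 1]
--         if s != t * i:
--             bad += 1
--     return bad
-- ===== Notes on version B (the rewrite author's own statement) =====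
-- stated objective: alternative
-- what changed: B replaces A's per-split re-summation of both slices (sum(an[:i]) and sum(an[i:]) recomputed for every i) by a single pass maintaining a running prefix sum compared to t*i, using that once sum(an) = t*n the suffix condition follows from the prefix one; Pre_ excludes n = 0 (A raises ZeroDivisionError) and the case n > len(an)+1 with sum(an) divisible by n, where A's slices silently saturate past the end of the list (outside the problem's domain, where n is the length of an) while B's direct indexing raises IndexError.
-- outside the precondition, e.g. on execute(4, [2, 2]): A returns 3, B raises IndexError
import Mathlib
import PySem

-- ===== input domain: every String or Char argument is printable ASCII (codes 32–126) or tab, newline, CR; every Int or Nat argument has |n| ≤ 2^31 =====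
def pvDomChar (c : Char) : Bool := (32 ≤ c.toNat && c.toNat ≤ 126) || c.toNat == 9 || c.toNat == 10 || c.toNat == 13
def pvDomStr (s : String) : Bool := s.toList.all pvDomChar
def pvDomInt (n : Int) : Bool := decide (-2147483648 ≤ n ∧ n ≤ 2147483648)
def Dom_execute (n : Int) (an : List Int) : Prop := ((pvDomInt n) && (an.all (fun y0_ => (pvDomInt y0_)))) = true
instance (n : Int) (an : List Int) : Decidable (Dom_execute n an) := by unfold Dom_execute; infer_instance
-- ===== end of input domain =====

-- B replaces A's per-split re-summation of both slices by one pass keeping a running prefix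
-- sum compared to t*i; proved to return A's exact value on Pre_ (n ≠ 0, n ≤ len(an)+1).

-- ===== PORT A =====
def execute (n : Int) (an : List Int) : Int :=
  if PySem.Int.mod an.sum n ≠ 0 then -1
  else
    let t := PySem.Int.floordiv an.sum n
    (PySem.List.pyRange 1 n 1).foldl
      (fun b i =>
        b + (if (PySem.List.slice an none (some i)).sum = t * i ∧
               (PySem.List.slice an (some i) none).sum = t * (n - i) then 0 else 1)) 0

-- ===== PORT B =====
def execute_alt (n : Int) (an : List Int) : Int :=
  let total := an.sum
  if PySem.Int.mod total n ≠ 0 then -1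
  else
    let t := PySem.Int.floordiv total n
    let r := (PySem.List.pyRange 1 n 1).foldl
      (fun (p : Int × Int) i =>
        -- an[i - 1]; exact here since Pre_ keeps i - 1 in range for every i of the loop
        let s := p.1 + PySem.List.pyGetD an (i - 1) 0
        (s, if s ≠ t * i then p.2 + 1 else p.2))
      (0, 0)
    r.2

-- ===== PRECONDITION & SPEC =====
-- Pre_ excludes n = 0, where A raises ZeroDivisionError at 'sum(an) % n', and n > len(an)+1
-- with sum(an) divisible by n, where A's slices silently saturate past the end of the list
-- (outside the problem's domain, in which n is the length of an) while B's direct indexing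
-- raises IndexError.
def Pre_execute (n : Int) (an : List Int) : Prop :=
  n ≠ 0 ∧ (PySem.Int.mod an.sum n ≠ 0 ∨ n ≤ (an.length : Int) + 1)
instance (n : Int) (an : List Int) : Decidable (Pre_execute n an) := by unfold Pre_execute; infer_instance

def pvWitness_execute : Int × List Int := (3, [1, 2, 3])

def Spec_execute (n : Int) (an : List Int) (out : Int) : Prop := out = execute_alt n an
instance (n : Int) (an : List Int) (out : Int) : Decidable (Spec_execute n an out) := by unfold Spec_execute; infer_instance

-- ===== CLAIM (what is proved, stated in full; the proofs are below) =====
def Claim_equal_execute : Prop := ∀ (n : Int) (an : List Int), Dom_execute n an → Pre_execute n an → Spec_execute n an (execute n an)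

-- ===== LEMMAS AND PROOFS =====

-- running prefix-sum step: one more element while the index stays in range
lemma take_sum_step (an : List Int) (a : Int) (ha : 1 ≤ a) (hle : a ≤ (an.length : Int)) :
    (an.take a.toNat).sum = (an.take (a - 1).toNat).sum + PySem.List.pyGetD an (a - 1) 0 := by
  have hj : (a - 1).toNat < an.length := by omega
  have hA : a.toNat = (a - 1).toNat + 1 := by omega
  rw [PySem.List.pyGetD_eq_getElem an 0 (by omega) (by omega : (a - 1 : Int) < (an.length : Int)), hA]
  exact List.sum_take_succ an (a - 1).toNat hj

-- A's two-slice split condition collapses to the prefix condition once an.sum = t*n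
lemma cond_iff (an : List Int) (t n i : Int) (hi : 0 ≤ i) (htot : an.sum = t * n) :
    ((PySem.List.slice an none (some i)).sum = t * i ∧
      (PySem.List.slice an (some i) none).sum = t * (n - i)) ↔
    (an.take i.toNat).sum = t * i := by
  rw [PySem.List.slice_to _ hi, PySem.List.slice_from _ hi]
  have hsplit : (an.take i.toNat).sum + (an.drop i.toNat).sum = an.sum := by
    rw [← List.sum_append, List.take_append_drop]
  constructor
  · exact fun h => h.1
  · intro h
    refine ⟨h, ?_⟩
    have : t * (n - i) = t * n - t * i := by ring
    omega

-- main loop correspondence, by induction on the remaining range length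
lemma loop_eq (an : List Int) (t n : Int) (htot : an.sum = t * n) :
    ∀ (m : Nat) (a c : Int), 1 ≤ a → a + m - 1 ≤ (an.length : Int) →
      ((PySem.List.pyRange a (a + m) 1).foldl
        (fun (p : Int × Int) i =>
          let s := p.1 + PySem.List.pyGetD an (i - 1) 0
          (s, if s ≠ t * i then p.2 + 1 else p.2))
        ((an.take (a - 1).toNat).sum, c)).2 =
      (PySem.List.pyRange a (a + m) 1).foldl
        (fun b i =>
          b + (if (PySem.List.slice an none (some i)).sum = t * i ∧
                 (PySem.List.slice an (some i) none).sum = t * (n - i) then 0 else 1)) c := by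
  intro m
  induction m with
  | zero => intro a c _ _; simp [PySem.List.pyRange_one_eq_nil (by omega : a + (0:Nat) ≤ a)]
  | succ k ih =>
    intro a c ha hlen
    rw [PySem.List.pyRange_one_cons (by push_cast; omega : a < a + ((k : Nat) + 1 : Nat))]
    simp only [List.foldl_cons]
    have hle : a ≤ (an.length : Int) := by push_cast at hlen ⊢; omega
    have hs : (an.take (a - 1).toNat).sum + PySem.List.pyGetD an (a - 1) 0 = (an.take a.toNat).sum :=
      (take_sum_step an a ha hle).symm
    have hrange : a + ((k : Nat) + 1 : Nat) = (a + 1) + (k : Nat) := by push_cast; ring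
    have hcond := cond_iff an t n a (by omega) htot
    have ha1 : (a + 1 - 1).toNat = a.toNat := by omega
    have hA : (c + (if (PySem.List.slice an none (some a)).sum = t * a ∧
          (PySem.List.slice an (some a) none).sum = t * (n - a) then 0 else 1)) =
        (if (an.take a.toNat).sum ≠ t * a then c + 1 else c) := by
      by_cases hc : (an.take a.toNat).sum = t * a
      · rw [if_pos (hcond.mpr hc), if_neg (by simp [hc])]; ring
      · rw [if_neg (fun h => hc (hcond.mp h)), if_pos (by simp [hc])]
    simp only [hs, hrange, hA]
    have := ih (a + 1) (if (an.take a.toNat).sum ≠ t * a then c + 1 else c) (by omega)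
      (by push_cast at hlen ⊢; omega)
    rw [ha1] at this
    exact this

-- ===== VERDICT (by name: the statement is the Claim_ definition above) =====
theorem execute_spec : Claim_equal_execute := by
  intro n an _ hn
  obtain ⟨hn0, hnd⟩ := hn
  unfold Spec_execute execute execute_alt
  by_cases hm : PySem.Int.mod an.sum n ≠ 0
  · simp [hm]
  · push_neg at hm
    have hnlen : n ≤ (an.length : Int) + 1 := by
      rcases hnd with h | h
      · exact absurd hm h
      · exact h
    simp only [hm, ne_eq, not_true_eq_false, if_neg, not_false_eq_true]
    set t := PySem.Int.floordiv an.sum n with ht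
    have htot : an.sum = t * n := by
      have := PySem.Int.floordiv_mul_add_mod an.sum n
      rw [hm] at this; linarith
    by_cases hn1 : n ≤ 1
    · simp [PySem.List.pyRange_one_eq_nil hn1]
    · have hrange : n = 1 + ((n - 1).toNat : Int) := by omega
      have := loop_eq an t n htot (n - 1).toNat 1 0 (by omega) (by omega)
      simp only [show ((1:Int) - 1).toNat = 0 from rfl, List.take_zero, List.sum_nil] at this
      rw [← hrange] at this
      exact this.symm
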